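-- pv_equiv track=rewrite | github.com/honghaoCai2333/lean4 | proof_assistant/lean_executor.py | format_lean_code
-- ===== SOURCE A (Python) =====
-- def format_lean_code(lean_code: str) -> str:
--     """
--     格式化Lean4代码（基础版本）
--     """
--     lines = lean_code.split('\n')
--     formatted_lines = []
--     indent_level = 0
--
--     for line in lines:
--         stripped = line.strip()
--         if not stripped:
--             formatted_lines.append('')
--             continue
--
--         # 简单的缩进逻辑
--         if any(keyword in stripped for keyword in ['theorem', 'lemma', 'def', 'structure', 'inductive']):
--             formatted_lines.append('  ' * indent_level + stripped)
--             if ':=' in stripped or 'by' in stripped: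
--                 indent_level += 1
--         elif stripped in ['by', 'where']:
--             formatted_lines.append('  ' * indent_level + stripped)
--             indent_level += 1
--         elif stripped.startswith('·') or stripped.startswith('sorry'):
--             formatted_lines.append('  ' * indent_level + stripped)
--         else:
--             formatted_lines.append('  ' * indent_level + stripped)
--
--     return '\n'.join(formatted_lines)
-- ===== SOURCE B (Python) =====
-- def format_lean_code(lean_code: str) -> str:
--     """Multi-pass reformulation: strip pass, per-line indent delta, prefix-sum of levels, render pass."""
--     KWS = ('theorem', 'lemma', 'def', 'structure', 'inductive')
--
--     def delta(s):
--         if any(k in s for k in KWS):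
--             return 1 if (':=' in s or 'by' in s) else 0
--         return 1 if s in ('by', 'where') else 0
--
--     stripped = [ln.strip() for ln in lean_code.split('\n')]
--     deltas = [delta(s) for s in stripped]
--     levels = []
--     lvl = 0
--     for d in deltas:
--         levels.append(lvl)
--         lvl += d
--     return '\n'.join('' if not s else '  ' * lv + s
--                      for s, lv in zip(stripped, levels))
-- ===== Notes on version B (the rewrite author's own statement) =====
-- stated objective: alternative
-- what changed: Replaces A's single stateful indent-accumulating loop with separate shaped passes: strip all lines, compute a per-line indent delta table, prefix-sum the deltas into per-line levels, then render each (stripped, level) pair and join.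
import Mathlib
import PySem

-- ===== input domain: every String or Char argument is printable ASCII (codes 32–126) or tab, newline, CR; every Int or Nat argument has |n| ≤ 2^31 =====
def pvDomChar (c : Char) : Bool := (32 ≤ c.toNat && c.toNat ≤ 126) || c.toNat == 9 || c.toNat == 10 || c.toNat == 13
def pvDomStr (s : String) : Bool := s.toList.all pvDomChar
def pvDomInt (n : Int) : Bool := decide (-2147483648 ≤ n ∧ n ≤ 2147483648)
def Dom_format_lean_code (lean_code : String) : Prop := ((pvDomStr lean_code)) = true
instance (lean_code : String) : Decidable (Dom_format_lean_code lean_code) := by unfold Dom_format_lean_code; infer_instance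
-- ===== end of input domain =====

-- B replaces A's single stateful loop by separate passes (strip, per-line delta, prefix-sum of
-- levels, render); objective: alternative decomposition, same cost.

-- '  ' * level + stripped  (level is never negative in either program's run)
def pvIndent (lvl : Int) (s : String) : String :=
  String.ofList (PySem.List.pyRepeat "  ".toList lvl) ++ s

-- any(keyword in stripped for keyword in ['theorem','lemma','def','structure','inductive'])
def pvHasKw (s : String) : Bool :=
  ["theorem", "lemma", "def", "structure", "inductive"].any (fun k => PySem.Str.isIn k s)

-- ===== PORT A =====
def pvStepA (st : Int × List String) (line : String) : Int × List String :=
  let stripped := PySem.Str.strip line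
  if stripped == "" then (st.1, st.2 ++ [""])
  else if pvHasKw stripped then
    if PySem.Str.isIn ":=" stripped || PySem.Str.isIn "by" stripped then
      (st.1 + 1, st.2 ++ [pvIndent st.1 stripped])
    else (st.1, st.2 ++ [pvIndent st.1 stripped])
  else if stripped == "by" || stripped == "where" then
    (st.1 + 1, st.2 ++ [pvIndent st.1 stripped])
  else if PySem.Str.startswith stripped "·" || PySem.Str.startswith stripped "sorry" then
    (st.1, st.2 ++ [pvIndent st.1 stripped])
  else (st.1, st.2 ++ [pvIndent st.1 stripped])

def format_lean_code (lean_code : String) : String :=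
  let lines := (PySem.Str.split? lean_code "\n").getD []
  let st := lines.foldl pvStepA (0, [])
  PySem.Str.join "\n" st.2

-- ===== PORT B =====
def pvDelta (s : String) : Int :=
  if pvHasKw s then
    if PySem.Str.isIn ":=" s || PySem.Str.isIn "by" s then 1 else 0
  else if s == "by" || s == "where" then 1 else 0

def format_lean_code_alt (lean_code : String) : String :=
  let stripped := ((PySem.Str.split? lean_code "\n").getD []).map PySem.Str.strip
  let deltas := stripped.map pvDelta
  let levels := (deltas.foldl (fun (st : Int × List Int) d => (st.1 + d, st.2 ++ [st.1])) (0, [])).2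
  PySem.Str.join "\n"
    ((stripped.zip levels).map (fun p => if p.1 == "" then "" else pvIndent p.2 p.1))

-- ===== PRECONDITION & SPEC =====
def Spec_format_lean_code (lean_code : String) (out : String) : Prop := out = format_lean_code_alt lean_code
instance (lean_code : String) (out : String) : Decidable (Spec_format_lean_code lean_code out) := by unfold Spec_format_lean_code; infer_instance

-- ===== CLAIM (what is proved, stated in full; the proofs are below) =====
def Claim_equal_format_lean_code : Prop := ∀ (lean_code : String), Dom_format_lean_code lean_code → Spec_format_lean_code lean_code (format_lean_code lean_code)

-- ===== LEMMAS AND PROOFS =====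

-- reference rendering both ports are reduced to
def pvRender (ss : List String) (lvl : Int) : List String :=
  match ss with
  | [] => []
  | s :: t => (if s == "" then "" else pvIndent lvl s) :: pvRender t (lvl + pvDelta s)

lemma pvStepA_snd (st : Int × List String) (line : String) :
    pvStepA st line =
      (st.1 + pvDelta (PySem.Str.strip line),
       st.2 ++ [if PySem.Str.strip line == "" then "" else pvIndent st.1 (PySem.Str.strip line)]) := by
  by_cases h : PySem.Str.strip line = ""
  · have h1 : pvHasKw "" = false := by decide
    have h2 : (("" : String) == "by" || ("" : String) == "where") = false := by decide
    simp only [pvStepA, pvDelta, h, h1, h2]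
    simp
  · have hb : (PySem.Str.strip line == "") = false := by simpa using h
    simp only [pvStepA, pvDelta, hb]
    split_ifs <;> simp_all

lemma foldA_eq (lines : List String) : ∀ (lvl : Int) (out : List String),
    (lines.foldl pvStepA (lvl, out)).2 = out ++ pvRender (lines.map PySem.Str.strip) lvl := by
  induction lines with
  | nil => intro lvl out; simp [pvRender]
  | cons l t ih =>
    intro lvl out
    simp only [List.foldl_cons, pvStepA_snd, List.map_cons, pvRender, ih, List.append_assoc,
      List.singleton_append]

def pvScan (ds : List Int) (lvl : Int) : List Int :=
  match ds with
  | [] => []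
  | d :: t => lvl :: pvScan t (lvl + d)

lemma foldLevels_eq (ds : List Int) : ∀ (lvl : Int) (acc : List Int),
    (ds.foldl (fun (st : Int × List Int) d => (st.1 + d, st.2 ++ [st.1])) (lvl, acc)).2 =
      acc ++ pvScan ds lvl := by
  induction ds with
  | nil => intro lvl acc; simp [pvScan]
  | cons d t ih =>
    intro lvl acc
    simp only [List.foldl_cons, pvScan, ih, List.append_assoc, List.singleton_append]

lemma zipRender_eq (ss : List String) : ∀ (lvl : Int),
    ((ss.zip (pvScan (ss.map pvDelta) lvl)).map
        (fun p => if p.1 == "" then "" else pvIndent p.2 p.1)) = pvRender ss lvl := by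
  induction ss with
  | nil => intro lvl; simp [pvScan, pvRender]
  | cons s t ih =>
    intro lvl
    simp only [List.map_cons, pvScan, List.zip_cons_cons, pvRender, ih]

-- ===== VERDICT (by name: the statement is the Claim_ definition above) =====
theorem format_lean_code_spec : Claim_equal_format_lean_code := by
  intro lean_code _hdom
  unfold Spec_format_lean_code format_lean_code format_lean_code_alt
  simp only [foldA_eq, foldLevels_eq, zipRender_eq, List.nil_append]
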